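-- pv_equiv track=rewrite | github.com/songShiPeng/pa | sklearn/lgbuse.py | ownGroupZeroCount
-- ===== SOURCE A (Python) =====
-- def ownGroupZeroCount(*arrs,**args2):
--     re = 0
--     pstate = True
--     for arr in arrs[0]:
--         if (arr == 0 and  not pstate):
--             re = re+1
--             pstate = True
--         else:
--             pstate = False
--     return re
-- ===== SOURCE B (Python) =====
-- def ownGroupZeroCount(*arrs, **args2):
--     xs = arrs[0]
--     total = 0
--     run = 0
--     at_start = True
--     for x in xs:
--         if x == 0:
--             run += 1
--         else:
--             total += run // 2 if at_start else (run + 1) // 2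
--             run = 0
--             at_start = False
--     total += run // 2 if at_start else (run + 1) // 2
--     return total
-- ===== Notes on version B (the rewrite author's own statement) =====
-- stated objective: alternative
-- what changed: B replaces A's per-element alternating flag with a single pass over maximal runs of consecutive zeros, adding floor(len/2) for a run starting the array and ceil(len/2) for every later run.
import Mathlib
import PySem

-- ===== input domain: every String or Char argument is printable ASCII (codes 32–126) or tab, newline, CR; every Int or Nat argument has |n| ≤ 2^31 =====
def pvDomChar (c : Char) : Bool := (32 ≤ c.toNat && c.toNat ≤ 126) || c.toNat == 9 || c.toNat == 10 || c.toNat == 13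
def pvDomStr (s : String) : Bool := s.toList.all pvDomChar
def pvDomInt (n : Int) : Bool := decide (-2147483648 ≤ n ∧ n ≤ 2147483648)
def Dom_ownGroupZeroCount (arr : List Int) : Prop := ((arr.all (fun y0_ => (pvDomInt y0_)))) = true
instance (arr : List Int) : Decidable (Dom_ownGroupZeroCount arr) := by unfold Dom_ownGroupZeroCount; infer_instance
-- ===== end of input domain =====

-- B counts by maximal zero-runs (floor(len/2) for a run at the front, ceil(len/2) otherwise) instead of A's per-element alternating flag; objective: alternative decomposition, same cost.

-- ===== PORT A =====
-- A: one flag pstate, count a zero only when the flag is off.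
def ownGroupZeroCount (arr : List Int) : Int :=
  (arr.foldl (fun (st : Int × Bool) x =>
      if x == 0 && !st.2 then (st.1 + 1, true) else (st.1, false))
    (0, true)).1

-- ===== PORT B =====
-- contribution of a finished zero-run: floor(run/2) if it starts the array, ceil(run/2) otherwise
def pvFlush (run : Int) (atStart : Bool) : Int :=
  if atStart then PySem.Int.floordiv run 2 else PySem.Int.floordiv (run + 1) 2

def ownGroupZeroCount_alt (arr : List Int) : Int :=
  let s := arr.foldl (fun (st : Int × Int × Bool) x =>
      if x == 0 then (st.1, st.2.1 + 1, st.2.2)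
      else (st.1 + pvFlush st.2.1 st.2.2, 0, false))
    (0, 0, true)
  s.1 + pvFlush s.2.1 s.2.2

-- ===== PRECONDITION & SPEC =====
def Spec_ownGroupZeroCount (arr : List Int) (out : Int) : Prop := out = ownGroupZeroCount_alt arr
instance (arr : List Int) (out : Int) : Decidable (Spec_ownGroupZeroCount arr out) := by unfold Spec_ownGroupZeroCount; infer_instance

-- ===== CLAIM (what is proved, stated in full; the proofs are below) =====
def Claim_equal_ownGroupZeroCount : Prop := ∀ (arr : List Int), Dom_ownGroupZeroCount arr → Spec_ownGroupZeroCount arr (ownGroupZeroCount arr)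

-- ===== LEMMAS AND PROOFS =====

-- B's state (total, run, atStart) determines A's state: A's flag is the parity of the current run
def pvPstate (run : Int) (atStart : Bool) : Bool :=
  if atStart then decide (run % 2 = 0) else decide (run % 2 = 1)

theorem pvFlush_eq (run : Int) (_h : 0 ≤ run) (atStart : Bool) :
    pvFlush run atStart = if atStart then run / 2 else (run + 1) / 2 := by
  unfold pvFlush
  rw [PySem.Int.floordiv_eq_ediv_of_pos (by omega), PySem.Int.floordiv_eq_ediv_of_pos (by omega)]

theorem pv_invariant (l : List Int) (re total run : Int) (atStart : Bool)
    (hrun : 0 ≤ run) (hre : re = total + pvFlush run atStart) :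
    (l.foldl (fun (st : Int × Bool) x =>
        if x == 0 && !st.2 then (st.1 + 1, true) else (st.1, false))
      (re, pvPstate run atStart)).1
    =
    (let s := l.foldl (fun (st : Int × Int × Bool) x =>
        if x == 0 then (st.1, st.2.1 + 1, st.2.2)
        else (st.1 + pvFlush st.2.1 st.2.2, 0, false))
      (total, run, atStart)
     s.1 + pvFlush s.2.1 s.2.2) := by
  induction l generalizing re total run atStart with
  | nil =>
    simp [List.foldl]; omega
  | cons x l ih =>
    by_cases hx : x = 0
    · subst hx
      rcases hps : pvPstate run atStart with _ | _
      · -- flag off: the zero is counted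
        have e1 : re + 1 = total + pvFlush (run + 1) atStart := by
          unfold pvPstate at hps
          rw [pvFlush_eq (run + 1) (by omega)]
          rw [pvFlush_eq run hrun] at hre
          rcases atStart <;> simp_all <;> omega
        have e2 : pvPstate (run + 1) atStart = true := by
          unfold pvPstate at hps ⊢
          rcases atStart <;> simp_all <;> omega
        simp only [List.foldl, beq_self_eq_true, Bool.not_false, Bool.and_self, if_true]
        have h := ih (re + 1) total (run + 1) atStart (by omega) e1
        rw [e2] at h
        exact h
      · -- flag on: the zero is skipped
        have e1 : re = total + pvFlush (run + 1) atStart := by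
          unfold pvPstate at hps
          rw [pvFlush_eq (run + 1) (by omega)]
          rw [pvFlush_eq run hrun] at hre
          rcases atStart <;> simp_all <;> omega
        have e2 : pvPstate (run + 1) atStart = false := by
          unfold pvPstate at hps ⊢
          rcases atStart <;> simp_all <;> omega
        simp only [List.foldl, beq_self_eq_true, Bool.not_true, Bool.and_false,
          Bool.false_eq_true, if_false]
        have h := ih re total (run + 1) atStart (by omega) e1
        rw [e2] at h
        exact h
    · -- nonzero element: A drops the flag, B flushes the run
      have h1 : (x == (0 : Int)) = false := by simp [hx]
      have e2 : pvPstate 0 false = false := by unfold pvPstate; simp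
      have hz : pvFlush 0 false = 0 := by rw [pvFlush_eq 0 (by omega)]; norm_num
      simp only [List.foldl, h1, Bool.false_and, Bool.false_eq_true, if_false]
      have h := ih re (total + pvFlush run atStart) 0 false (by omega) (by omega)
      rw [e2] at h
      exact h

-- ===== VERDICT (by name: the statement is the Claim_ definition above) =====
theorem ownGroupZeroCount_spec : Claim_equal_ownGroupZeroCount := by
  intro arr _
  unfold Spec_ownGroupZeroCount ownGroupZeroCount ownGroupZeroCount_alt
  have h := pv_invariant arr 0 0 0 true (by omega) (by simp [pvFlush_eq])
  simpa [pvPstate] using h
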